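-- pv_equiv track=rewrite | github.com/antonk404/quiz-solver-stepik | src/stepik/solvers.py | _match_terms_to_options
-- ===== SOURCE A (Python) =====
-- def _find_option_index(
--     target: str,
--     options: list[str],
--     used: set[int],
-- ) -> int | None:
--     """Ищет индекс совпадения: сначала точное, потом по регистру."""
--     for j, option in enumerate(options):
--         if j not in used and option == target:
--             return j
--
--     lower_target = target.lower()
--     for j, option in enumerate(options):
--         if j not in used and option.lower() == lower_target:
--             return j
--
--     # Fuzzy: содержание (для случаев с лишними пробелами)
--     stripped = target.strip().lower()
--     for j, option in enumerate(options):
--         if j not in used and option.strip().lower() == stripped: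
--             return j
--
--     return None
--
-- def _match_terms_to_options(
--     terms: list[str],
--     options: list[str],
--     correct: dict[str, str],
-- ) -> list[int] | None:
--     """Строит ordering по маппингу."""
--     ordering: list[int] = []
--     used: set[int] = set()
--
--     for term in terms:
--         expected = correct.get(term)
--         if expected is None:
--             return None
--
--         found = _find_option_index(expected, options, used)
--         if found is not None:
--             ordering.append(found)
--             used.add(found)
--         else:
--             return None
--
--     return ordering
-- ===== SOURCE B (Python) =====
-- def _pick_option_index(target, options, used):
--     """Single pass: return first unused exact match immediately; otherwise
--     remember the first unused case-insensitive and first unused stripped match."""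
--     lower_target = target.lower()
--     stripped_target = target.strip().lower()
--     lower_hit = None
--     strip_hit = None
--     for j, option in enumerate(options):
--         if j in used:
--             continue
--         if option == target:
--             return j
--         if lower_hit is None and option.lower() == lower_target:
--             lower_hit = j
--         if strip_hit is None and option.strip().lower() == stripped_target:
--             strip_hit = j
--     return lower_hit if lower_hit is not None else strip_hit
--
--
-- def _match_terms_to_options(terms, options, correct):
--     try:
--         expected = [correct[term] for term in terms]
--     except KeyError:
--         return None
--     used = set()
--     ordering = []
--     for target in expected:
--         j = _pick_option_index(target, options, used)
--         if j is None:
--             return None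
--         used.add(j)
--         ordering.append(j)
--     return ordering
-- ===== Notes on version B (the rewrite author's own statement) =====
-- stated objective: alternative
-- what changed: B resolves all term lookups up front with a comprehension and replaces A's three sequential scans per term (exact, lowercase, stripped) by a single pass that returns on the first unused exact match and records the first unused lowercase/stripped candidates.
import Mathlib
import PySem

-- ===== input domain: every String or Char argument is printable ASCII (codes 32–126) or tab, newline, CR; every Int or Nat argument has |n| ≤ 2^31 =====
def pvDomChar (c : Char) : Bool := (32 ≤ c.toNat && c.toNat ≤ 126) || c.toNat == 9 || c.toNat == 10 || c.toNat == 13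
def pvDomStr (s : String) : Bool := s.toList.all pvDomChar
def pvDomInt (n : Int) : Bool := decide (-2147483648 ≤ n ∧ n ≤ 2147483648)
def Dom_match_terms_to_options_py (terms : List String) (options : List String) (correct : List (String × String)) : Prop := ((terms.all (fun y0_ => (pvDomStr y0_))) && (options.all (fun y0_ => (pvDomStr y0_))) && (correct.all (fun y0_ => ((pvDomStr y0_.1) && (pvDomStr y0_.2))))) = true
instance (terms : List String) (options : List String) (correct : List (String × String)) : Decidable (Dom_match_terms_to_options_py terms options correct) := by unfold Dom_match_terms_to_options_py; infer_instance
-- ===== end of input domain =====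

-- B makes one pass over the options per term (instead of A's three sequential scans) and
-- resolves all dictionary lookups up front; same result, same asymptotic cost (objective: alternative).

-- ===== PORT A =====
-- _find_option_index: three 'for … return' loops in order (each is a first-match search).
def findOptionIndex (target : String) (options : List String) (used : PySem.Set Int) : Option Int :=
  match (PySem.List.enumerate options).find? (fun jo => !(PySem.Set.contains used jo.1) && jo.2 == target) with
  | some jo => some jo.1
  | none =>
    let lowerTarget := PySem.Str.lower target
    match (PySem.List.enumerate options).find? (fun jo => !(PySem.Set.contains used jo.1) && PySem.Str.lower jo.2 == lowerTarget) with
    | some jo => some jo.1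
    | none =>
      let stripped := PySem.Str.lower (PySem.Str.strip target)
      match (PySem.List.enumerate options).find? (fun jo => !(PySem.Set.contains used jo.1) && PySem.Str.lower (PySem.Str.strip jo.2) == stripped) with
      | some jo => some jo.1
      | none => none

-- A's outer 'for term in terms' loop with the (ordering, used) state and early 'return None'.
def matchLoopA (options : List String) (correct : PySem.Dict String String) :
    List String → List Int → PySem.Set Int → Option (List Int)
  | [], ordering, _ => some ordering
  | term :: rest, ordering, used =>
    match correct.get? term with
    | none => none
    | some expected =>
      match findOptionIndex expected options used with
      | some found => matchLoopA options correct rest (ordering ++ [found]) (PySem.Set.add used found)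
      | none => none

def match_terms_to_options_py (terms : List String) (options : List String) (correct : List (String × String)) : Option (List Int) :=
  matchLoopA options (PySem.Dict.ofList correct) terms [] PySem.Set.empty

-- ===== PORT B =====
-- _pick_option_index: single loop over enumerate(options); early return on an unused exact match,
-- accumulators lowerHit/stripHit for the first unused lowercase / stripped candidate.
def pickLoop (target lowerTarget strippedTarget : String) (used : PySem.Set Int) :
    List (Int × String) → Option Int → Option Int → Option Int
  | [], lowerHit, stripHit => lowerHit.or stripHit
  | (j, option) :: rest, lowerHit, stripHit =>
    if PySem.Set.contains used j then
      pickLoop target lowerTarget strippedTarget used rest lowerHit stripHit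
    else if option == target then
      some j
    else
      let lowerHit' := if lowerHit.isNone && (PySem.Str.lower option == lowerTarget) then some j else lowerHit
      let stripHit' := if stripHit.isNone && (PySem.Str.lower (PySem.Str.strip option) == strippedTarget) then some j else stripHit
      pickLoop target lowerTarget strippedTarget used rest lowerHit' stripHit'

def pickOptionIndex (target : String) (options : List String) (used : PySem.Set Int) : Option Int :=
  pickLoop target (PySem.Str.lower target) (PySem.Str.lower (PySem.Str.strip target)) used
    (PySem.List.enumerate options) none none

-- B's second phase: assign an index to each already-resolved expected value.
def assignLoop (options : List String) :
    List String → List Int → PySem.Set Int → Option (List Int)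
  | [], ordering, _ => some ordering
  | target :: rest, ordering, used =>
    match pickOptionIndex target options used with
    | none => none
    | some j => assignLoop options rest (ordering ++ [j]) (PySem.Set.add used j)

def match_terms_to_options_py_alt (terms : List String) (options : List String) (correct : List (String × String)) : Option (List Int) :=
  -- '[correct[term] for term in terms]' with 'except KeyError: return None' is mapM over Option
  match terms.mapM (fun term => (PySem.Dict.ofList correct).get? term) with
  | none => none
  | some expected => assignLoop options expected [] PySem.Set.empty

-- ===== PRECONDITION & SPEC =====
def Spec_match_terms_to_options_py (terms : List String) (options : List String) (correct : List (String × String)) (out : Option (List Int)) : Prop := out = match_terms_to_options_py_alt terms options correct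
instance (terms : List String) (options : List String) (correct : List (String × String)) (out : Option (List Int)) : Decidable (Spec_match_terms_to_options_py terms options correct out) := by unfold Spec_match_terms_to_options_py; infer_instance

-- ===== CLAIM (what is proved, stated in full; the proofs are below) =====
def Claim_equal_match_terms_to_options_py : Prop := ∀ (terms : List String) (options : List String) (correct : List (String × String)), Dom_match_terms_to_options_py terms options correct → Spec_match_terms_to_options_py terms options correct (match_terms_to_options_py terms options correct)

-- ===== LEMMAS AND PROOFS =====

-- B's single pass equals the three first-match searches chained with 'or', with the
-- accumulators taking precedence over the remaining lowercase/stripped searches.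
theorem pickLoop_eq (target lt st : String) (used : PySem.Set Int) :
    ∀ (xs : List (Int × String)) (l s : Option Int),
    pickLoop target lt st used xs l s =
      ((xs.find? (fun jo => !(PySem.Set.contains used jo.1) && jo.2 == target)).map (·.1)).or
        ((l.or ((xs.find? (fun jo => !(PySem.Set.contains used jo.1) && PySem.Str.lower jo.2 == lt)).map (·.1))).or
          (s.or ((xs.find? (fun jo => !(PySem.Set.contains used jo.1) && PySem.Str.lower (PySem.Str.strip jo.2) == st)).map (·.1)))) := by
  intro xs
  induction xs with
  | nil => intro l s; simp [pickLoop]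
  | cons p rest ih =>
    intro l s
    obtain ⟨j, option⟩ := p
    by_cases hu : j ∈ used
    · simp [pickLoop, PySem.Set.contains, hu, List.find?, ih]
    · by_cases he : option = target
      · simp [pickLoop, PySem.Set.contains, hu, he, List.find?]
      · have he' : (option == target) = false := beq_eq_false_iff_ne.mpr he
        simp only [pickLoop]
        cases l <;> cases s <;>
          cases hl : (PySem.Str.lower option == lt) <;>
          cases hs : (PySem.Str.lower (PySem.Str.strip option) == st) <;>
            simp [List.find?, PySem.Set.contains, hu, he', hl, hs, Option.or, ih]

theorem pick_eq_find (target : String) (options : List String) (used : PySem.Set Int) :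
    pickOptionIndex target options used = findOptionIndex target options used := by
  unfold pickOptionIndex findOptionIndex
  rw [pickLoop_eq]
  cases h1 : (PySem.List.enumerate options).find? (fun jo => !(PySem.Set.contains used jo.1) && jo.2 == target) with
  | some jo => simp [Option.or]
  | none =>
    simp only [Option.map_none, Option.or]
    cases h2 : (PySem.List.enumerate options).find? (fun jo => !(PySem.Set.contains used jo.1) && PySem.Str.lower jo.2 == PySem.Str.lower target) with
    | some jo => simp
    | none =>
      cases h3 : (PySem.List.enumerate options).find? (fun jo => !(PySem.Set.contains used jo.1) && PySem.Str.lower (PySem.Str.strip jo.2) == PySem.Str.lower (PySem.Str.strip target)) with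
      | some jo => simp
      | none => simp

-- A's fused loop equals B's two phases, for any accumulator and used-set state.
theorem matchLoopA_eq (options : List String) (correct : PySem.Dict String String) :
    ∀ (terms : List String) (ordering : List Int) (used : PySem.Set Int),
    matchLoopA options correct terms ordering used =
      match terms.mapM (fun term => correct.get? term) with
      | none => none
      | some expected => assignLoop options expected ordering used := by
  intro terms
  induction terms with
  | nil => intro ordering used; simp [matchLoopA, assignLoop]
  | cons term rest ih =>
    intro ordering used
    cases hg : correct.get? term with
    | none => simp [matchLoopA, List.mapM_cons, hg]
    | some expected =>
      cases hp : findOptionIndex expected options used with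
      | none =>
        cases hm : rest.mapM (fun term => correct.get? term) <;>
          simp [matchLoopA, List.mapM_cons, hg, hm, hp, assignLoop, pick_eq_find]
      | some j =>
        simp only [matchLoopA, hg, hp]
        rw [ih]
        cases hm : rest.mapM (fun term => correct.get? term) <;>
          simp [List.mapM_cons, hg, hm, assignLoop, pick_eq_find, hp]

-- ===== VERDICT (by name: the statement is the Claim_ definition above) =====
theorem match_terms_to_options_py_spec : Claim_equal_match_terms_to_options_py := by
  intro terms options correct _
  unfold Spec_match_terms_to_options_py match_terms_to_options_py match_terms_to_options_py_alt
  rw [matchLoopA_eq]
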